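-- pv_equiv track=rewrite | github.com/ghltorrhdiddl2/codingtest | p_level1_sj/nov/nov_8/moie.py | solutionn
-- ===== SOURCE A (Python) =====
-- def solutionn(answers):
--     s1 = [1, 2, 3, 4, 5]  # 5개
--     s2 = [2, 1, 2, 3, 2, 4, 2, 5]  # 8개
--     s3 = [3, 3, 1, 1, 2, 2, 4, 4, 5, 5]  # 10개
--     score = [0, 0, 0]
--     winner = []
--
--     for i, v in enumerate(answers):
--         if v == s1[(i % len(s1))]:   # 반복주기 5
--             score[0] += 1
--         if v == s2[(i % len(s2))]:
--             score[1] += 1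
--         if v == s3[(i % len(s3))]:
--             score[2] += 1
--
--     for idx, s in enumerate(score):
--         if s == max(score):
--             winner.append(idx + 1)
--
--     return winner
-- ===== SOURCE B (Python) =====
-- def solutionn(answers):
--     # Tile each pattern to the common period 40 = lcm(5, 8, 10); then no modular
--     # indexing is needed: score block by block, comparing each 40-element block of
--     # answers positionally against the fixed tile with zip.
--     tiles = [[1, 2, 3, 4, 5] * 8,
--              [2, 1, 2, 3, 2, 4, 2, 5] * 5,
--              [3, 3, 1, 1, 2, 2, 4, 4, 5, 5] * 4]
--
--     def hits(tile):
--         total = 0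
--         for start in range(0, len(answers), 40):
--             block = answers[start:start + 40]
--             total += sum(1 for a, b in zip(block, tile) if a == b)
--         return total
--
--     scores = [hits(t) for t in tiles]
--     m = max(scores)
--     return [i + 1 for i, s in enumerate(scores) if s == m]
-- ===== Notes on version B (the rewrite author's own statement) =====
-- stated objective: alternative
-- what changed: B eliminates A's per-element modular indexing entirely: it tiles each pattern to the common period 40 = lcm(5,8,10) and scores by consuming the answers in 40-element blocks, comparing each block positionally against the fixed tile with zip; winners come from a comprehension over the score list instead of A's append loop.
import Mathlib
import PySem

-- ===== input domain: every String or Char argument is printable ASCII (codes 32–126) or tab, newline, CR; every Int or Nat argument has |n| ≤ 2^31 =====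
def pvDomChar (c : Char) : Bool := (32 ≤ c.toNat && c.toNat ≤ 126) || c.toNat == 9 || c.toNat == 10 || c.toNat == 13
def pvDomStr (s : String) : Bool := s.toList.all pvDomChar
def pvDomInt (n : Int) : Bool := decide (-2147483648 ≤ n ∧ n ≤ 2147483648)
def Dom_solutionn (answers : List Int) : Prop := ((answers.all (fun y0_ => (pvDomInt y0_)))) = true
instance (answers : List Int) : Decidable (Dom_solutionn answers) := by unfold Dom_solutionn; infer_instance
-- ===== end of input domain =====

-- B replaces A's per-element modular indexing by a different mechanism: each pattern is
-- tiled to the common period 40 = lcm(5,8,10) and the answers are consumed in 40-element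
-- blocks, each compared positionally against the fixed tile with zip (objective: alternative).

-- ===== PORT A =====
-- pattern value at absolute index i: pat[i % len(pat)]
def pvAt (pat : List Int) (i : Int) : Int :=
  PySem.List.pyGetD pat (PySem.Int.mod i (pat.length : Int)) 0

-- the body of A's single loop: test v against all three patterns, bumping the triple of scores
def pvStepA (sc : Int × Int × Int) (iv : Int × Int) : Int × Int × Int :=
  let s1 : List Int := [1, 2, 3, 4, 5]
  let s2 : List Int := [2, 1, 2, 3, 2, 4, 2, 5]
  let s3 : List Int := [3, 3, 1, 1, 2, 2, 4, 4, 5, 5]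
  let sc := if iv.2 = pvAt s1 iv.1 then (sc.1 + 1, sc.2.1, sc.2.2) else sc
  let sc := if iv.2 = pvAt s2 iv.1 then (sc.1, sc.2.1 + 1, sc.2.2) else sc
  if iv.2 = pvAt s3 iv.1 then (sc.1, sc.2.1, sc.2.2 + 1) else sc

-- literal port of A: one fold over enumerate(answers) updating the triple of scores,
-- then an append-loop over enumerate(score) collecting indices attaining the max.
def solutionn (answers : List Int) : List Int :=
  let score : Int × Int × Int := (PySem.List.enumerate answers).foldl pvStepA (0, 0, 0)
  let scoreL : List Int := [score.1, score.2.1, score.2.2]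
  -- max(score) over the 3-element list (constant across the loop)
  let m : Int := max score.1 (max score.2.1 score.2.2)
  (PySem.List.enumerate scoreL).foldl
    (fun w p => if p.2 = m then w ++ [p.1 + 1] else w) []

-- ===== PORT B =====
-- sum(1 for a, b in zip(block, tile) if a == b)
def pvZipHits (block tile : List Int) : Int :=
  (block.zip tile).foldl (fun n ab => if ab.1 = ab.2 then n + 1 else n) 0

-- Source B's hits(tile): for start in range(0, len(answers), 40): total += zip-count of answers[start:start+40]
def pvBlockHits (tile xs : List Int) : Int :=
  (PySem.List.pyRange 0 (xs.length : Int) 40).foldl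
    (fun total st => total + pvZipHits (PySem.List.slice xs (some st) (some (st + 40))) tile) 0

def solutionn_alt (answers : List Int) : List Int :=
  let tiles : List (List Int) :=
    [(List.replicate 8 ([1, 2, 3, 4, 5] : List Int)).flatten,
     (List.replicate 5 ([2, 1, 2, 3, 2, 4, 2, 5] : List Int)).flatten,
     (List.replicate 4 ([3, 3, 1, 1, 2, 2, 4, 4, 5, 5] : List Int)).flatten]
  let scores : List Int := tiles.map (fun t => pvBlockHits t answers)
  let m : Int := (PySem.List.max? scores (fun x => x)).getD 0   -- scores has three elements, so max? is some
  (PySem.List.enumerate scores).filterMap (fun p => if p.2 = m then some (p.1 + 1) else none)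

-- ===== PRECONDITION & SPEC =====
def Spec_solutionn (answers : List Int) (out : List Int) : Prop := out = solutionn_alt answers
instance (answers : List Int) (out : List Int) : Decidable (Spec_solutionn answers out) := by unfold Spec_solutionn; infer_instance

-- ===== CLAIM (what is proved, stated in full; the proofs are below) =====
def Claim_equal_solutionn : Prop := ∀ (answers : List Int), Dom_solutionn answers → Spec_solutionn answers (solutionn answers)

-- ===== LEMMAS AND PROOFS =====

-- the fused fold of A computes the three independent per-pattern counts componentwise
theorem pv_fused (l : List (Int × Int)) (a b c : Int) :
    l.foldl pvStepA (a, b, c)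
    = (l.foldl (fun n iv => if iv.2 = pvAt [1, 2, 3, 4, 5] iv.1 then n + 1 else n) a,
       l.foldl (fun n iv => if iv.2 = pvAt [2, 1, 2, 3, 2, 4, 2, 5] iv.1 then n + 1 else n) b,
       l.foldl (fun n iv => if iv.2 = pvAt [3, 3, 1, 1, 2, 2, 4, 4, 5, 5] iv.1 then n + 1 else n) c) := by
  induction l generalizing a b c with
  | nil => rfl
  | cons hd tl ih =>
      simp only [List.foldl_cons, pvStepA]
      split_ifs <;> exact ih _ _ _

-- proof-side restatement of B's block loop: peel 40-element blocks off the front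
def pvHitsB (tile : List Int) : List Int → Int
  | [] => 0
  | x :: rest =>
      pvZipHits (List.take 40 (x :: rest)) tile + pvHitsB tile (List.drop 40 (x :: rest))
termination_by l => l.length
decreasing_by simp

-- Source B's indexed block loop computes the same as the front-peeling recursion
theorem pvBlockHits_eq (tile : List Int) :
    ∀ (n : Nat) (xs : List Int), xs.length ≤ n → pvBlockHits tile xs = pvHitsB tile xs := by
  intro n
  induction n with
  | zero =>
      intro xs h
      have hx : xs = [] := List.eq_nil_of_length_eq_zero (by omega)
      subst hx
      simp [pvBlockHits, pvHitsB, PySem.List.pyRange_of_pos 0 0 (show (0:Int) < 40 by norm_num)]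
  | succ n ih =>
      intro xs h
      cases xs with
      | nil => simp [pvBlockHits, pvHitsB, PySem.List.pyRange_of_pos 0 0 (show (0:Int) < 40 by norm_num)]
      | cons x rest =>
          unfold pvHitsB
          rw [← ih (List.drop 40 (x :: rest)) (by simp at h ⊢; omega)]
          unfold pvBlockHits
          rw [PySem.List.foldl_add, PySem.List.foldl_add,
            PySem.List.pyRange_of_pos 0 ((x :: rest).length : Int) (by norm_num),
            PySem.List.pyRange_of_pos 0 ((List.drop 40 (x :: rest)).length : Int) (by norm_num)]
          have hq : (if (0 : Int) < ((x :: rest).length : Int) then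
                ((((x :: rest).length : Int) - 0 + 40 - 1) / 40).toNat else 0)
              = (if (0 : Int) < ((List.drop 40 (x :: rest)).length : Int) then
                ((((List.drop 40 (x :: rest)).length : Int) - 0 + 40 - 1) / 40).toNat else 0) + 1 := by
            simp only [List.length_drop, List.length_cons]
            split_ifs <;> push_cast <;> omega
          rw [hq, List.range_succ_eq_map]
          simp only [List.map_cons, List.map_map, List.sum_cons, Nat.cast_zero, mul_zero,
            zero_add]
          congr 1
          · -- first block: answers[0:40] = take 40 xs
            congr 1
            rw [PySem.List.slice_zero_start, PySem.List.slice_to _ (by norm_num)]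
            rfl
          · -- remaining blocks: answers[40(k+1) : 40(k+1)+40] = (drop 40 answers)[40k : 40k+40]
            congr 1
            apply List.map_congr_left
            intro k _
            simp only [Function.comp, Nat.succ_eq_add_one]
            congr 1
            have h1 : (40 : Int) * (((k + 1 : Nat)) : Int) = ((40 * (k + 1) : Nat) : Int) := by
              push_cast; ring
            have h2 : (40 : Int) * (((k + 1 : Nat)) : Int) + 40 = ((40 * (k + 1) + 40 : Nat) : Int) := by
              push_cast; ring
            have h3 : (40 : Int) * ((k : Nat) : Int) = ((40 * k : Nat) : Int) := by push_cast; ring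
            have h4 : (40 : Int) * ((k : Nat) : Int) + 40 = ((40 * k + 40 : Nat) : Int) := by
              push_cast; ring
            rw [h2, h1, h4, h3, PySem.List.slice_natCast, PySem.List.slice_natCast,
              List.drop_drop]
            have e1 : 40 * (k + 1) + 40 - 40 * (k + 1) = 40 * k + 40 - 40 * k := by omega
            have e2 : 40 * (k + 1) = 40 + 40 * k := by omega
            rw [e1, e2]

-- A's per-pattern count as a countP over enumerate(answers) with start s
def pvCnt (pat : List Int) (s : Int) (xs : List Int) : Nat :=
  (PySem.List.enumerate xs s).countP (fun iv => decide (iv.2 = pvAt pat iv.1))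

theorem pvZipHits_eq (b t : List Int) :
    pvZipHits b t = (((b.zip t).countP (fun ab => decide (ab.1 = ab.2)) : Nat) : Int) := by
  simpa [pvZipHits] using
    PySem.List.foldl_ite_add_one (p := fun ab : Int × Int => ab.1 = ab.2) (l := b.zip t) (a := 0)

theorem pvAt_per (pat : List Int) (hL : 0 < (pat.length : Int)) (hd : (pat.length : Int) ∣ 40)
    (s : Int) : pvAt pat (s + 40) = pvAt pat s := by
  unfold pvAt
  obtain ⟨k, hk⟩ := hd
  rw [PySem.Int.mod_eq_emod_of_pos hL, PySem.Int.mod_eq_emod_of_pos hL, hk,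
    Int.add_mul_emod_self_left]

theorem pvCnt_per (pat : List Int) (hL : 0 < (pat.length : Int)) (hd : (pat.length : Int) ∣ 40)
    (xs : List Int) (s : Int) : pvCnt pat (s + 40) xs = pvCnt pat s xs := by
  induction xs generalizing s with
  | nil => rfl
  | cons x xs ih =>
      have h1 : s + 40 + 1 = (s + 1) + 40 := by ring
      simp only [pvCnt, PySem.List.enumerate_cons, List.countP_cons] at *
      rw [h1, ih (s + 1), pvAt_per pat hL hd s]

theorem pvCnt_append (pat : List Int) (s : Int) (xs ys : List Int) :
    pvCnt pat s (xs ++ ys) = pvCnt pat s xs + pvCnt pat (s + xs.length) ys := by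
  simp [pvCnt, PySem.List.enumerate_append, List.countP_append]

theorem pvCnt_zip (pat tile : List Int) (Hlen : tile.length = 40)
    (Htile : ∀ j : Nat, j < 40 → pvAt pat (j : Int) = tile.getD j 0) :
    ∀ (ys : List Int) (j : Nat), j + ys.length ≤ 40 →
      pvCnt pat (j : Int) ys = (ys.zip (tile.drop j)).countP (fun ab => decide (ab.1 = ab.2)) := by
  intro ys
  induction ys with
  | nil => intro j h; rfl
  | cons y ys ih =>
      intro j h
      have hj : j < tile.length := by rw [Hlen]; simp at h; omega
      have hdrop : tile.drop j = tile[j] :: tile.drop (j + 1) := List.drop_eq_getElem_cons hj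
      have hcast : (j : Int) + 1 = ((j + 1 : Nat) : Int) := by push_cast; ring
      have hval : pvAt pat (j : Int) = tile[j] := by
        rw [Htile j (by omega), List.getD_eq_getElem tile 0 hj]
      simp only [pvCnt, PySem.List.enumerate_cons, List.countP_cons, hdrop, List.zip_cons_cons,
        hcast, hval]
      rw [show (PySem.List.enumerate ys ((j + 1 : Nat) : Int)).countP
            (fun iv => decide (iv.2 = pvAt pat iv.1)) = pvCnt pat ((j + 1 : Nat) : Int) ys from rfl,
        ih (j + 1) (by simp at h; omega)]

theorem pvCnt_hits (pat tile : List Int) (hL : 0 < (pat.length : Int))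
    (hd : (pat.length : Int) ∣ 40) (Hlen : tile.length = 40)
    (Htile : ∀ j : Nat, j < 40 → pvAt pat (j : Int) = tile.getD j 0) :
    ∀ (n : Nat) (xs : List Int), xs.length ≤ n → ((pvCnt pat 0 xs : Nat) : Int) = pvHitsB tile xs := by
  intro n
  induction n with
  | zero =>
      intro xs h
      have : xs = [] := List.eq_nil_of_length_eq_zero (by omega)
      subst this; simp [pvCnt, pvHitsB]
  | succ n ih =>
      intro xs h
      cases xs with
      | nil => simp [pvCnt, pvHitsB]
      | cons x rest =>
          unfold pvHitsB
          by_cases hlen : (x :: rest).length ≤ 40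
          · have htake : List.take 40 (x :: rest) = x :: rest := List.take_of_length_le hlen
            have hdropnil : List.drop 40 (x :: rest) = [] := List.drop_eq_nil_of_le hlen
            rw [htake, hdropnil, pvZipHits_eq]
            have hz := pvCnt_zip pat tile Hlen Htile (x :: rest) 0 (by simpa using hlen)
            simp only [Nat.cast_zero, List.drop_zero] at hz
            rw [hz]
            simp [pvHitsB]
          · push Not at hlen
            have hsplit := List.take_append_drop 40 (x :: rest)
            have htl : (List.take 40 (x :: rest)).length = 40 :=
              List.length_take_of_le (by omega)
            calc ((pvCnt pat 0 (x :: rest) : Nat) : Int)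
                = ((pvCnt pat 0 (List.take 40 (x :: rest) ++ List.drop 40 (x :: rest)) : Nat) : Int) := by
                  rw [hsplit]
              _ = pvZipHits (List.take 40 (x :: rest)) tile + pvHitsB tile (List.drop 40 (x :: rest)) := by
                  rw [pvCnt_append, htl]
                  have hper : pvCnt pat (0 + (40 : Nat)) (List.drop 40 (x :: rest))
                      = pvCnt pat 0 (List.drop 40 (x :: rest)) := by
                    simpa using pvCnt_per pat hL hd (List.drop 40 (x :: rest)) 0
                  rw [hper]
                  have hz := pvCnt_zip pat tile Hlen Htile (List.take 40 (x :: rest)) 0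
                    (by omega)
                  simp only [Nat.cast_zero, List.drop_zero] at hz
                  rw [pvZipHits_eq]
                  have hih : ((pvCnt pat 0 (List.drop 40 (x :: rest)) : Nat) : Int)
                      = pvHitsB tile (List.drop 40 (x :: rest)) := by
                    apply ih
                    have := List.length_drop (l := x :: rest) (i := 40)
                    simp at h ⊢; omega
                  push_cast [hz]
                  rw [hih]

-- max over the three-element score list
theorem pvMax3 (a b c : Int) : (PySem.List.max? [a, b, c] (fun x => x)).getD 0 = max a (max b c) := by
  rw [PySem.List.max?_id_cons]
  simp [List.foldl_cons]

-- ===== VERDICT (by name: the statement is the Claim_ definition above) =====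
theorem solutionn_spec : Claim_equal_solutionn := by
  intro answers _
  show solutionn answers = solutionn_alt answers
  unfold solutionn solutionn_alt
  rw [pv_fused]
  have bridge : ∀ (pat tile : List Int), 0 < (pat.length : Int) → (pat.length : Int) ∣ 40 →
      tile.length = 40 → (∀ j : Nat, j < 40 → pvAt pat (j : Int) = tile.getD j 0) →
      (PySem.List.enumerate answers).foldl
        (fun n iv => if iv.2 = pvAt pat iv.1 then n + 1 else n) 0 = pvBlockHits tile answers := by
    intro pat tile hL hd Hlen Htile
    rw [PySem.List.foldl_ite_add_one (p := fun iv : Int × Int => iv.2 = pvAt pat iv.1)]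
    rw [pvBlockHits_eq tile answers.length answers le_rfl]
    simpa using pvCnt_hits pat tile hL hd Hlen Htile answers.length answers le_rfl
  rw [bridge [1, 2, 3, 4, 5] ((List.replicate 8 ([1, 2, 3, 4, 5] : List Int)).flatten)
        (by norm_num) (by norm_num) (by rfl) (by decide),
      bridge [2, 1, 2, 3, 2, 4, 2, 5] ((List.replicate 5 ([2, 1, 2, 3, 2, 4, 2, 5] : List Int)).flatten)
        (by norm_num) (by norm_num) (by rfl) (by decide),
      bridge [3, 3, 1, 1, 2, 2, 4, 4, 5, 5] ((List.replicate 4 ([3, 3, 1, 1, 2, 2, 4, 4, 5, 5] : List Int)).flatten)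
        (by norm_num) (by norm_num) (by rfl) (by decide)]
  simp only [List.map_cons, List.map_nil, pvMax3, PySem.List.enumerate_cons,
    PySem.List.enumerate_nil, List.foldl_cons, List.foldl_nil, List.filterMap_cons,
    List.filterMap_nil]
  split_ifs <;> simp
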